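-- pv_equiv track=rewrite | github.com/Hao-Yuan-He/A3BL | examples/hwf/wsabl.py | _valid_candidate
-- ===== SOURCE A (Python) =====
-- def _valid_candidate(formula):
--     if len(formula) % 2 == 0:
--         return False
--     for i in range(len(formula)):
--         if i % 2 == 0 and formula[i] not in [
--             "1",
--             "2",
--             "3",
--             "4",
--             "5",
--             "6",
--             "7",
--             "8",
--             "9",
--         ]:
--             return False
--         if i % 2 != 0 and formula[i] not in ["+", "-", "times", "div"]:
--             return False
--     return True
-- ===== SOURCE B (Python) =====
-- _DIGITS = {"1", "2", "3", "4", "5", "6", "7", "8", "9"}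
-- _OPS = {"+", "-", "times", "div"}
--
--
-- def _valid_candidate(formula):
--     if len(formula) % 2 == 0:
--         return False
--     return set(formula[::2]) <= _DIGITS and set(formula[1::2]) <= _OPS
-- ===== Notes on version B (the rewrite author's own statement) =====
-- stated objective: idiomatic
-- what changed: Replaces the index-dispatched loop with a parity partition: slice the even and odd positions (formula[::2], formula[1::2]) and validate each group with a single set-subset test against constant sets.
import Mathlib
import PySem

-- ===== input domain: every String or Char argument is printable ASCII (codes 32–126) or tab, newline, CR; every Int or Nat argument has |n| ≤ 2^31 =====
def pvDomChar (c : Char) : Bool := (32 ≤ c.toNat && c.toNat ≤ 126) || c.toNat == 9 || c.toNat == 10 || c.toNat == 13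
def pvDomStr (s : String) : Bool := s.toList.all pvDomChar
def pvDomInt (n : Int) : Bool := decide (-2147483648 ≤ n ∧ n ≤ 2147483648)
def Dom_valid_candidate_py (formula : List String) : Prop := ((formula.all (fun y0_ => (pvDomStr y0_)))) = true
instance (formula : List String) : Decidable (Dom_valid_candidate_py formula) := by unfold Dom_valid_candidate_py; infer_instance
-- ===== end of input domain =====

-- B replaces A's index-dispatched validation loop by a parity partition: slice the even- and
-- odd-position tokens and test each group with one set-subset check (idiomatic; same cost).


-- ===== PORT A =====
-- the two literal lists A tests membership against
def pvDigits : List String := ["1", "2", "3", "4", "5", "6", "7", "8", "9"]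
def pvOps : List String := ["+", "-", "times", "div"]

-- the 'for i in range(len(formula))' loop: two ifs returning False, else next index
def validA_go (formula : List String) : List Int → Bool
  | [] => true
  | i :: rest =>
    if PySem.Int.mod i 2 = 0 ∧ ¬ (PySem.List.pyGetD formula i "" ∈ pvDigits) then false
    else if PySem.Int.mod i 2 ≠ 0 ∧ ¬ (PySem.List.pyGetD formula i "" ∈ pvOps) then false
    else validA_go formula rest

def valid_candidate_py (formula : List String) : Bool :=
  if PySem.Int.mod (PySem.List.len formula) 2 = 0 then false
  else validA_go formula (PySem.List.pyRange 0 (PySem.List.len formula) 1)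

-- ===== PORT B =====
def pvDigitsSet : PySem.Set String := PySem.Set.ofList ["1", "2", "3", "4", "5", "6", "7", "8", "9"]
def pvOpsSet : PySem.Set String := PySem.Set.ofList ["+", "-", "times", "div"]

def valid_candidate_py_alt (formula : List String) : Bool :=
  if PySem.Int.mod (PySem.List.len formula) 2 = 0 then false
  else
    PySem.Set.issubset (PySem.Set.ofList ((PySem.List.slice? formula none none 2).getD [])) pvDigitsSet
    && PySem.Set.issubset (PySem.Set.ofList ((PySem.List.slice? formula (some 1) none 2).getD [])) pvOpsSet

-- ===== PRECONDITION & SPEC =====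
def Spec_valid_candidate_py (formula : List String) (out : Bool) : Prop := out = valid_candidate_py_alt formula
instance (formula : List String) (out : Bool) : Decidable (Spec_valid_candidate_py formula out) := by unfold Spec_valid_candidate_py; infer_instance

-- ===== CLAIM (what is proved, stated in full; the proofs are below) =====
def Claim_equal_valid_candidate_py : Prop := ∀ (formula : List String), Dom_valid_candidate_py formula → Spec_valid_candidate_py formula (valid_candidate_py formula)

-- ===== LEMMAS AND PROOFS =====

-- the tokens at even positions (Python's formula[::2])
def evens {α : Type} : List α → List α
  | [] => []
  | [a] => [a]
  | a :: _ :: xs => a :: evens xs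

lemma evens_cons {α : Type} (x : α) (xs : List α) : evens (x :: xs) = x :: evens xs.tail := by
  cases xs <;> rfl

-- the filterMap/range core that slice? with step 2 produces
lemma evens_core {α : Type} : ∀ (t : List α),
    (List.range ((((t.length : Int)) + 1) / 2).toNat).filterMap
      (fun (k : Nat) => t[((0 : Int) + 2 * (k : Int)).toNat]?) = evens t := by
  intro t
  induction t using evens.induct with
  | case1 => simp [evens]
  | case2 a => simp [evens]
  | case3 a b xs ih =>
    have hcount : (((((a :: b :: xs).length : Int)) + 1) / 2).toNat
        = ((((xs.length : Int)) + 1) / 2).toNat + 1 := by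
      simp only [List.length_cons]; push_cast; omega
    rw [hcount, List.range_succ_eq_map, List.filterMap_cons, List.filterMap_map]
    have hf : ∀ (k : Nat), ((fun (k : Nat) => (a :: b :: xs)[((0 : Int) + 2 * (k : Int)).toNat]?) ∘ Nat.succ) k
        = xs[((0 : Int) + 2 * (k : Int)).toNat]? := by
      intro k
      simp only [Function.comp_apply]
      have h1 : ((0 : Int) + 2 * ((Nat.succ k : Nat) : Int)).toNat = 2 * k + 2 := by push_cast; omega
      have h2 : ((0 : Int) + 2 * ((k : Nat) : Int)).toNat = 2 * k := by omega
      rw [h1, h2]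
      simp
    rw [List.filterMap_congr (fun k _ => hf k), ih]
    norm_num [evens]

lemma slice_evens {α : Type} (xs : List α) :
    PySem.List.slice? xs none none 2 = some (evens xs) := by
  rw [← evens_core]
  simp only [PySem.List.slice?, PySem.List.sliceIndices]
  simp only [show ¬((2 : Int) = 0) by decide, if_false, show ¬((2 : Int) < 0) by decide, if_false,
    show (0 : Int) < 2 by decide, if_true]
  have hc : (if 0 < (xs.length : Int) then (((xs.length : Int) - 0 + 2 - 1) / 2).toNat else 0)
      = (((xs.length : Int) + 1) / 2).toNat := by split_ifs with h <;> omega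
  rw [hc]

lemma slice_odds {α : Type} (xs : List α) :
    PySem.List.slice? xs (some 1) none 2 = some (evens xs.tail) := by
  cases xs with
  | nil => rfl
  | cons a t =>
    rw [show (a :: t).tail = t from rfl, ← evens_core]
    simp only [PySem.List.slice?, PySem.List.sliceIndices]
    simp only [show ¬((2 : Int) = 0) by decide, if_false, show ¬((2 : Int) < 0) by decide, if_false,
      show (0 : Int) < 2 by decide, if_true, show ¬((1 : Int) < 0) by decide]
    have hmin : min (1 : Int) ((a :: t).length : Int) = 1 := by
      simp only [List.length_cons]; push_cast; omega
    rw [hmin]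
    have hc : (if (1 : Int) < ((a :: t).length : Int) then ((((a :: t).length : Int) - 1 + 2 - 1) / 2).toNat else 0)
        = (((t.length : Int) + 1) / 2).toNat := by
      simp only [List.length_cons]; split_ifs with h <;> push_cast at * <;> omega
    rw [hc]
    congr 1
    apply List.filterMap_congr
    intro k _
    have h1 : ((1 : Int) + 2 * (k : Int)).toNat = 2 * k + 1 := by omega
    have h2 : ((0 : Int) + 2 * (k : Int)).toNat = 2 * k := by omega
    rw [h1, h2]
    simp

-- A's loop as a structural alternating check
def chk2 (even : Bool) : List String → Bool
  | [] => true
  | x :: rest => (if even then decide (x ∈ pvDigits) else decide (x ∈ pvOps)) && chk2 (!even) rest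

lemma goA : ∀ (cur pre : List String),
    validA_go (pre ++ cur) (PySem.List.pyRange (pre.length : Int) ((pre.length : Int) + (cur.length : Int)) 1)
      = chk2 (pre.length % 2 == 0) cur := by
  intro cur
  induction cur with
  | nil =>
    intro pre
    rw [PySem.List.pyRange_one_eq_nil (by simp)]
    rfl
  | cons x rest ih =>
    intro pre
    rw [PySem.List.pyRange_one_cons (by simp only [List.length_cons]; push_cast; omega)]
    have hget : PySem.List.pyGetD (pre ++ x :: rest) (pre.length : Int) "" = x := by
      simp [PySem.List.pyGetD]
    have hmod : PySem.Int.mod (pre.length : Int) 2 = ((pre.length % 2 : Nat) : Int) :=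
      PySem.Int.mod_natCast pre.length 2
    have hassoc : pre ++ x :: rest = (pre ++ [x]) ++ rest := by simp
    have hstep : ((pre.length : Int) + 1) = (((pre ++ [x]).length : Nat) : Int) := by
      simp only [List.length_append, List.length_cons, List.length_nil]; push_cast; omega
    have hbound : ((pre.length : Int) + (((x :: rest).length : Nat) : Int))
        = (((pre ++ [x]).length : Nat) : Int) + ((rest.length : Nat) : Int) := by
      simp only [List.length_append, List.length_cons, List.length_nil]; push_cast; omega
    have hpar : ((pre ++ [x]).length % 2 == 0) = !(pre.length % 2 == 0) := by
      rcases Nat.mod_two_eq_zero_or_one pre.length with h | h <;>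
        simp [List.length_append, Nat.add_mod, h]
    have htail : validA_go (pre ++ x :: rest)
        (PySem.List.pyRange ((pre.length : Int) + 1) ((pre.length : Int) + (((x :: rest).length : Nat) : Int)) 1)
        = chk2 (!(pre.length % 2 == 0)) rest := by
      rw [hstep, hbound, hassoc, ih (pre ++ [x]), hpar]
    simp only [validA_go, hget, hmod, chk2]
    rcases Nat.mod_two_eq_zero_or_one pre.length with h0 | h1
    · rw [h0]
      by_cases hx : x ∈ pvDigits
      · rw [if_neg (by simp [hx]), if_neg (by simp), htail]
        simp [h0, hx]
      · rw [if_pos (by simp [hx])]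
        simp [hx]
    · rw [h1]
      by_cases hx : x ∈ pvOps
      · rw [if_neg (by simp), if_neg (by simp [hx]), htail]
        simp [h1, hx]
      · rw [if_neg (by simp), if_pos (by simp [hx])]
        simp [hx]

lemma chk2_eq (f : List String) :
    chk2 true f = ((evens f).all (fun x => decide (x ∈ pvDigits))
      && (evens f.tail).all (fun x => decide (x ∈ pvOps))) := by
  induction f using evens.induct with
  | case1 => rfl
  | case2 a => simp [chk2, evens]
  | case3 a b xs ih =>
    have htail : evens (a :: b :: xs).tail = b :: evens xs.tail := evens_cons b xs
    simp only [chk2, Bool.not_true, Bool.not_false, evens, htail, List.all_cons, ih]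
    cases decide (a ∈ pvDigits) <;> cases decide (b ∈ pvOps) <;>
      cases (evens xs).all (fun x => decide (x ∈ pvDigits)) <;>
      cases (evens xs.tail).all (fun x => decide (x ∈ pvOps)) <;> rfl

lemma issubset_ofList_all (l d : List String) :
    PySem.Set.issubset (PySem.Set.ofList l) (PySem.Set.ofList d) = l.all (fun x => decide (x ∈ d)) := by
  rw [Bool.eq_iff_iff, PySem.Set.issubset_iff, List.all_eq_true]
  simp [PySem.Set.mem_ofList]

-- ===== VERDICT (by name: the statement is the Claim_ definition above) =====
theorem valid_candidate_py_spec : Claim_equal_valid_candidate_py := by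
  intro formula _
  unfold Spec_valid_candidate_py valid_candidate_py valid_candidate_py_alt
  by_cases h : PySem.Int.mod (PySem.List.len formula) 2 = 0
  · rw [if_pos h, if_pos h]
  · rw [if_neg h, if_neg h]
    have hA : validA_go formula (PySem.List.pyRange 0 (PySem.List.len formula) 1) = chk2 true formula := by
      have := goA formula []
      simpa [PySem.List.len] using this
    rw [hA, chk2_eq, slice_evens, slice_odds]
    simp only [Option.getD_some]
    rw [show pvDigitsSet = PySem.Set.ofList pvDigits from rfl,
      show pvOpsSet = PySem.Set.ofList pvOps from rfl,
      issubset_ofList_all, issubset_ofList_all]
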